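-- pv_equiv track=rewrite | github.com/abuss/pykod | pykod_config_generator.py | _categorize_flatpak_packages
-- ===== SOURCE A (Python) =====
-- def _categorize_flatpak_packages(packages: list) -> dict:
--     """Categorize Flatpak packages by domain/type."""
--     categories = {
--         "Development": [],
--         "Graphics & Design": [],
--         "Office & Productivity": [],
--         "Communication": [],
--         "Media & Entertainment": [],
--         "Education & Science": [],
--         "Games": [],
--         "Utilities": [],
--         "GNOME Applications": [],
--         "Other": [],
--     }
--
--     patterns = {
--         "Development": ["dev.", "code", "editor", "ide", "git"],
--         "Graphics & Design": ["gimp", "inkscape", "blender", "design", "graphics"],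
--         "Office & Productivity": [
--             "office",
--             "document",
--             "pdf",
--             "note",
--             "text",
--             "writer",
--             "calc",
--         ],
--         "Communication": [
--             "chat",
--             "mail",
--             "message",
--             "social",
--             "discord",
--             "telegram",
--         ],
--         "Media & Entertainment": [
--             "media",
--             "player",
--             "music",
--             "video",
--             "audio",
--             "tube",
--         ],
--         "Education & Science": [
--             "education",
--             "science",
--             "math",
--             "research",
--             "reference",
--         ],
--         "Games": ["game", "gaming", "entertainment"],
--         "Utilities": ["tool", "util", "manager", "system"],
--         "GNOME Applications": ["org.gnome", "gnome"],
--     }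
--
--     for pkg in packages:
--         categorized = False
--         for category, pattern_list in patterns.items():
--             for pattern in pattern_list:
--                 if pattern in pkg.lower():
--                     categories[category].append(pkg)
--                     categorized = True
--                     break
--             if categorized:
--                 break
--
--         if not categorized:
--             categories["Other"].append(pkg)
--
--     return {k: sorted(v) for k, v in categories.items() if v}
-- ===== SOURCE B (Python) =====
-- _PATTERNS = [
--     ("Development", ["dev.", "code", "editor", "ide", "git"]),
--     ("Graphics & Design", ["gimp", "inkscape", "blender", "design", "graphics"]),
--     ("Office & Productivity", ["office", "document", "pdf", "note", "text", "writer", "calc"]),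
--     ("Communication", ["chat", "mail", "message", "social", "discord", "telegram"]),
--     ("Media & Entertainment", ["media", "player", "music", "video", "audio", "tube"]),
--     ("Education & Science", ["education", "science", "math", "research", "reference"]),
--     ("Games", ["game", "gaming", "entertainment"]),
--     ("Utilities", ["tool", "util", "manager", "system"]),
--     ("GNOME Applications", ["org.gnome", "gnome"]),
-- ]
--
--
-- def _categorize_flatpak_packages(packages: list) -> dict:
--     """Sort once globally, then sieve: each category claims its matches from the
--     still-unclaimed (already sorted) packages; whatever survives is Other."""
--     result = {}
--     remaining = sorted(packages)
--     for cat, pats in _PATTERNS: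
--         hit, rest = [], []
--         for pkg in remaining:
--             low = pkg.lower()
--             (hit if any(p in low for p in pats) else rest).append(pkg)
--         if hit:
--             result[cat] = hit
--         remaining = rest
--     if remaining:
--         result["Other"] = remaining
--     return result
-- ===== Notes on version B (the rewrite author's own statement) =====
-- stated objective: alternative
-- what changed: Instead of classifying each package into a mutable 10-key dict via three nested loops with break flags and then sorting every category, B sorts the whole input once and sieves it category by category: each category partitions the still-unclaimed (already sorted) packages into its hits and the rest, and the final leftover is Other, so no per-category sorting and no per-package break-flag classification remain.
import Mathlib
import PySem

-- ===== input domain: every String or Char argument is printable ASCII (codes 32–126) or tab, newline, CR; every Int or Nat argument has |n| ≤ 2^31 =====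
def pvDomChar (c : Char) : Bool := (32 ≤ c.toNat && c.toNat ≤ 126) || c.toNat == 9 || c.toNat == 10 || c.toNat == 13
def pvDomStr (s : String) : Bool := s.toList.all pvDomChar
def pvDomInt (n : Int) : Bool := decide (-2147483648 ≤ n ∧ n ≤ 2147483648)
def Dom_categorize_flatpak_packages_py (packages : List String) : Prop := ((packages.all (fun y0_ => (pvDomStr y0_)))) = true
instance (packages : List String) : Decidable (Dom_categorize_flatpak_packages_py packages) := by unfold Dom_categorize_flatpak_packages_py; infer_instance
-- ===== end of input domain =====

-- B replaces A's per-package classification into a mutable dict (three nested loops with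
-- break flags, then a per-category sort) by one global sort followed by a category-by-category
-- sieve: each category claims its matches from the still-unclaimed, already-sorted packages,
-- so no per-category sorting and no break-flag classification remain (alternative algorithm).

-- ===== PORT A =====
def pyPatternsA : List (String × List String) :=
  [("Development", ["dev.", "code", "editor", "ide", "git"]),
   ("Graphics & Design", ["gimp", "inkscape", "blender", "design", "graphics"]),
   ("Office & Productivity", ["office", "document", "pdf", "note", "text", "writer", "calc"]),
   ("Communication", ["chat", "mail", "message", "social", "discord", "telegram"]),
   ("Media & Entertainment", ["media", "player", "music", "video", "audio", "tube"]),
   ("Education & Science", ["education", "science", "math", "research", "reference"]),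
   ("Games", ["game", "gaming", "entertainment"]),
   ("Utilities", ["tool", "util", "manager", "system"]),
   ("GNOME Applications", ["org.gnome", "gnome"])]

def initCatsA : List (String × List String) :=
  [("Development", []), ("Graphics & Design", []), ("Office & Productivity", []),
   ("Communication", []), ("Media & Entertainment", []), ("Education & Science", []),
   ("Games", []), ("Utilities", []), ("GNOME Applications", []), ("Other", [])]

-- inner loop: 'for pattern in pattern_list: if pattern in pkg.lower(): … break'
def anyPatA (low : String) : List String → Bool
  | [] => false
  | p :: rest => if PySem.Str.isIn p low then true else anyPatA low rest

-- middle loop with the 'categorized' break flag: first category with a matching pattern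
def matchCatA (low : String) : List (String × List String) → Option String
  | [] => none
  | (c, pl) :: rest => if anyPatA low pl then some c else matchCatA low rest

-- categories[key].append(pkg) on the fixed-key dict (keys never change)
def appendAtA (cats : List (String × List String)) (key pkg : String) : List (String × List String) :=
  cats.map (fun kv => if kv.1 == key then (kv.1, kv.2 ++ [pkg]) else kv)

def categorize_flatpak_packages_py (packages : List String) : List (String × List String) :=
  let cats := packages.foldl (fun cats pkg =>
    match matchCatA (PySem.Str.lower pkg) pyPatternsA with
    | some c => appendAtA cats c pkg
    | none => appendAtA cats "Other" pkg) initCatsA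
  cats.filterMap (fun kv =>
    if kv.2 ≠ [] then some (kv.1, PySem.List.sorted kv.2 (fun x => x) false) else none)

-- ===== PORT B =====
def pyPatternsB : List (String × List String) :=
  [("Development", ["dev.", "code", "editor", "ide", "git"]),
   ("Graphics & Design", ["gimp", "inkscape", "blender", "design", "graphics"]),
   ("Office & Productivity", ["office", "document", "pdf", "note", "text", "writer", "calc"]),
   ("Communication", ["chat", "mail", "message", "social", "discord", "telegram"]),
   ("Media & Entertainment", ["media", "player", "music", "video", "audio", "tube"]),
   ("Education & Science", ["education", "science", "math", "research", "reference"]),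
   ("Games", ["game", "gaming", "entertainment"]),
   ("Utilities", ["tool", "util", "manager", "system"]),
   ("GNOME Applications", ["org.gnome", "gnome"])]

-- any(p in low for p in pats)
def matchesB (pats : List String) (pkg : String) : Bool :=
  pats.any (fun p => PySem.Str.isIn p (PySem.Str.lower pkg))

-- the loop over _PATTERNS with its (result, remaining) state: each category splits the
-- still-unclaimed packages into its hits and the rest
def sieveB : List String → List (String × List String) → List (String × List String) × List String
  | remaining, [] => ([], remaining)
  | remaining, (c, pl) :: rest =>
      let pr := remaining.partition (fun pkg => matchesB pl pkg)
      let out := sieveB pr.2 rest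
      (if pr.1 ≠ [] then (c, pr.1) :: out.1 else out.1, out.2)

def categorize_flatpak_packages_py_alt (packages : List String) : List (String × List String) :=
  let out := sieveB (PySem.List.sorted packages (fun x => x) false) pyPatternsB
  out.1 ++ (if out.2 ≠ [] then [("Other", out.2)] else [])

-- ===== PRECONDITION & SPEC =====
def Spec_categorize_flatpak_packages_py (packages : List String) (out : List (String × List String)) : Prop := out = categorize_flatpak_packages_py_alt packages
instance (packages : List String) (out : List (String × List String)) : Decidable (Spec_categorize_flatpak_packages_py packages out) := by unfold Spec_categorize_flatpak_packages_py; infer_instance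

-- ===== CLAIM (what is proved, stated in full; the proofs are below) =====
def Claim_equal_categorize_flatpak_packages_py : Prop := ∀ (packages : List String), Dom_categorize_flatpak_packages_py packages → Spec_categorize_flatpak_packages_py packages (categorize_flatpak_packages_py packages)

-- ===== LEMMAS AND PROOFS =====

-- A's classifier as a single function
def cA (pkg : String) : String := (matchCatA (PySem.Str.lower pkg) pyPatternsA).getD "Other"

def orderA : List String := pyPatternsA.map Prod.fst ++ ["Other"]

-- A's hand-rolled break loop is List.any
theorem anyPat_eq_matches (pkg : String) (pl : List String) :
    anyPatA (PySem.Str.lower pkg) pl = matchesB pl pkg := by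
  induction pl with
  | nil => rfl
  | cons p rest ih =>
    simp only [anyPatA, matchesB, List.any_cons] at ih ⊢
    rw [ih]
    cases hiI : PySem.Str.isIn p (PySem.Str.lower pkg) <;> simp

theorem matchCat_mem (low c : String) (ps : List (String × List String))
    (h : matchCatA low ps = some c) : c ∈ ps.map Prod.fst := by
  induction ps with
  | nil => simp [matchCatA] at h
  | cons cp rest ih =>
    obtain ⟨c', pl⟩ := cp
    by_cases hm : anyPatA low pl = true
    · simp [matchCatA, hm] at h; simp [h]
    · simp [matchCatA, hm] at h
      exact List.mem_cons_of_mem _ (ih h)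

theorem appendAt_map (keys : List String) (f : String → List String) (key pkg : String) :
    appendAtA (keys.map (fun k => (k, f k))) key pkg =
      keys.map (fun k => (k, if k == key then f k ++ [pkg] else f k)) := by
  simp only [appendAtA, List.map_map]
  refine List.map_congr_left (fun k _ => ?_)
  by_cases h : k = key <;> simp [h]

-- loop invariant: A's fold appends, per key, exactly the packages it classifies to that key
theorem fold_invariant (packages : List String) (keys : List String) (f : String → List String) :
    packages.foldl (fun cats pkg =>
        match matchCatA (PySem.Str.lower pkg) pyPatternsA with
        | some c => appendAtA cats c pkg
        | none => appendAtA cats "Other" pkg) (keys.map (fun k => (k, f k))) =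
      keys.map (fun k => (k, f k ++ packages.filter (fun p => cA p == k))) := by
  induction packages generalizing f with
  | nil => simp
  | cons pkg rest ih =>
    have hstep : (match matchCatA (PySem.Str.lower pkg) pyPatternsA with
        | some c => appendAtA (keys.map (fun k => (k, f k))) c pkg
        | none => appendAtA (keys.map (fun k => (k, f k))) "Other" pkg) =
        appendAtA (keys.map (fun k => (k, f k))) (cA pkg) pkg := by
      unfold cA
      cases matchCatA (PySem.Str.lower pkg) pyPatternsA <;> rfl
    rw [List.foldl_cons, hstep, appendAt_map,
      ih (fun k => if k == cA pkg then f k ++ [pkg] else f k)]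
    refine List.map_congr_left (fun k _ => ?_)
    by_cases h : cA pkg = k
    · simp [h]
    · have h' : (k == cA pkg) = false := by simp [Ne.symm h]
      simp [h', show (cA pkg == k) = false by simp [h]]

-- sorted commutes with filter (identity key): filter a sorted list instead of sorting a filter
theorem sorted_filter (packages : List String) (q : String → Bool) :
    PySem.List.sorted (packages.filter q) (fun x => x) false =
      (PySem.List.sorted packages (fun x => x) false).filter q := by
  refine PySem.List.sorted_id_eq_of_perm_of_pairwise _ _ ?_ ?_
  · exact (PySem.List.sorted_perm packages (fun x => x) false).filter q
  · exact (PySem.List.sorted_pairwise packages (fun x => x)).sublist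
      List.filter_sublist

-- the sieve's leftover is exactly what A classifies as "Other"
theorem sieve_snd (ps : List (String × List String)) (s : List String) :
    (sieveB s ps).2 = s.filter (fun pkg => matchCatA (PySem.Str.lower pkg) ps == none) := by
  induction ps generalizing s with
  | nil => simp [sieveB, matchCatA]
  | cons cp rest ih =>
    obtain ⟨c, pl⟩ := cp
    simp only [sieveB, List.partition_eq_filter_filter, ih, List.filter_filter]
    refine List.filter_congr (fun pkg _ => ?_)
    simp only [matchCatA, anyPat_eq_matches pkg pl]
    cases hM : matchesB pl pkg <;> simp [hM]

-- A's per-category groups, read off from the full classifier, are the sieve's output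
theorem A_to_sieve (ps : List (String × List String)) (hnd : (ps.map Prod.fst).Nodup)
    (s : List String) :
    ps.filterMap (fun cp =>
        let m := s.filter (fun pkg => matchCatA (PySem.Str.lower pkg) ps == some cp.1)
        if m ≠ [] then some (cp.1, m) else none) = (sieveB s ps).1 := by
  induction ps generalizing s with
  | nil => simp [sieveB]
  | cons cp rest ih =>
    obtain ⟨c, pl⟩ := cp
    rw [List.map_cons, List.nodup_cons] at hnd
    obtain ⟨hc, hnd'⟩ := hnd
    have hhead : s.filter (fun pkg =>
        matchCatA (PySem.Str.lower pkg) ((c, pl) :: rest) == some c) =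
        s.filter (fun pkg => matchesB pl pkg) := by
      refine List.filter_congr (fun pkg _ => ?_)
      simp only [matchCatA, anyPat_eq_matches pkg pl]
      cases hM : matchesB pl pkg
      · simp only [Bool.false_eq_true, if_false]
        cases hm : matchCatA (PySem.Str.lower pkg) rest with
        | none => simp
        | some c' =>
          have h1 : c' ∈ rest.map Prod.fst := matchCat_mem _ _ _ hm
          have h2 : c' ≠ c := fun e => hc (e ▸ h1)
          simp [h2]
      · simp
    have htail : ∀ cp' ∈ rest,
        s.filter (fun pkg =>
          matchCatA (PySem.Str.lower pkg) ((c, pl) :: rest) == some cp'.1) =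
        (s.filter (fun pkg => ! matchesB pl pkg)).filter
          (fun pkg => matchCatA (PySem.Str.lower pkg) rest == some cp'.1) := by
      intro cp' hmem
      have hne : cp'.1 ≠ c := by
        intro e
        apply hc
        rw [← e]
        exact List.mem_map.mpr ⟨cp', hmem, rfl⟩
      rw [List.filter_filter]
      refine List.filter_congr (fun pkg _ => ?_)
      simp only [matchCatA, anyPat_eq_matches pkg pl]
      cases hM : matchesB pl pkg <;> simp [Ne.symm hne]
    have hsplit : sieveB s ((c, pl) :: rest) =
        (if s.filter (fun pkg => matchesB pl pkg) ≠ [] then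
            (c, s.filter (fun pkg => matchesB pl pkg)) ::
              (sieveB (s.filter (fun pkg => ! matchesB pl pkg)) rest).1
          else (sieveB (s.filter (fun pkg => ! matchesB pl pkg)) rest).1,
         (sieveB (s.filter (fun pkg => ! matchesB pl pkg)) rest).2) := by
      rw [sieveB, List.partition_eq_filter_filter]
      simp only [Function.comp_def]
    have hrest : rest.filterMap (fun cp' =>
        let m := s.filter (fun pkg =>
          matchCatA (PySem.Str.lower pkg) ((c, pl) :: rest) == some cp'.1)
        if m ≠ [] then some (cp'.1, m) else none) =
        (sieveB (s.filter (fun pkg => ! matchesB pl pkg)) rest).1 := by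
      rw [← ih hnd']
      exact List.filterMap_congr (fun cp' hmem => by simp only [htail cp' hmem])
    by_cases h : s.filter (fun pkg => matchesB pl pkg) = []
    · rw [List.filterMap_cons_none, hrest, hsplit]
      · simp [h]
      · simp only [hhead]
        simp [h]
    · rw [List.filterMap_cons_some (b := (c, s.filter (fun pkg => matchesB pl pkg))),
        hrest, hsplit]
      · simp [h]
      · simp only [hhead]
        simp [h]

-- cA agrees with the raw classifier on category names …
theorem filter_cA_name (s : List String) (c : String) (hc : c ≠ "Other") :
    s.filter (fun p => cA p == c) =
      s.filter (fun pkg => matchCatA (PySem.Str.lower pkg) pyPatternsA == some c) := by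
  refine List.filter_congr (fun pkg _ => ?_)
  unfold cA
  cases matchCatA (PySem.Str.lower pkg) pyPatternsA with
  | none => simp [Ne.symm hc]
  | some c' => simp

-- … and classifies to "Other" exactly where no pattern matches
theorem filter_cA_other (s : List String) :
    s.filter (fun p => cA p == "Other") =
      s.filter (fun pkg => matchCatA (PySem.Str.lower pkg) pyPatternsA == none) := by
  refine List.filter_congr (fun pkg _ => ?_)
  unfold cA
  cases hm : matchCatA (PySem.Str.lower pkg) pyPatternsA with
  | none => simp
  | some c' =>
    have h1 : c' ∈ pyPatternsA.map Prod.fst := matchCat_mem _ _ _ hm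
    have h2 : "Other" ∉ pyPatternsA.map Prod.fst := by decide
    have : c' ≠ "Other" := fun e => h2 (e ▸ h1)
    simp [this]

-- ===== VERDICT (by name: the statement is the Claim_ definition above) =====
theorem categorize_flatpak_packages_py_spec : Claim_equal_categorize_flatpak_packages_py := by
  intro packages _
  show categorize_flatpak_packages_py packages = categorize_flatpak_packages_py_alt packages
  have hkeys : initCatsA = (orderA.map (fun k => (k, ([] : List String)))) := rfl
  have hBA : pyPatternsB = pyPatternsA := rfl
  unfold categorize_flatpak_packages_py categorize_flatpak_packages_py_alt
  rw [hkeys, fold_invariant packages orderA (fun _ => []), hBA]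
  simp only [List.nil_append, List.filterMap_map]
  unfold orderA
  rw [List.filterMap_append]
  congr 1
  · -- the named categories: A's groups = the sieve's first component
    rw [← A_to_sieve pyPatternsA (by decide) (PySem.List.sorted packages (fun x => x) false)]
    rw [List.filterMap_map]
    refine List.filterMap_congr (fun cp hmem => ?_)
    have hc : cp.1 ≠ "Other" := by
      have h2 : "Other" ∉ pyPatternsA.map Prod.fst := by decide
      exact fun e => h2 (e ▸ List.mem_map.mpr ⟨cp, hmem, rfl⟩)
    have hm : PySem.List.sorted (packages.filter (fun p => cA p == cp.1)) (fun x => x) false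
        = (PySem.List.sorted packages (fun x => x) false).filter
            (fun pkg => matchCatA (PySem.Str.lower pkg) pyPatternsA == some cp.1) := by
      rw [sorted_filter, filter_cA_name _ _ hc]
    by_cases h : packages.filter (fun p => cA p == cp.1) = []
    · have h2 : (PySem.List.sorted packages (fun x => x) false).filter
          (fun pkg => matchCatA (PySem.Str.lower pkg) pyPatternsA == some cp.1) = [] := by
        rw [← hm, h]
        simp [PySem.List.sorted_eq_nil_iff]
      simp only [Function.comp_apply, h, h2]
      simp
    · have h2 : (PySem.List.sorted packages (fun x => x) false).filter
          (fun pkg => matchCatA (PySem.Str.lower pkg) pyPatternsA == some cp.1) ≠ [] := by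
        rw [← hm]
        simpa [PySem.List.sorted_eq_nil_iff] using h
      simp only [Function.comp_apply, ne_eq, h, not_false_iff, if_true, h2, hm]
  · -- "Other": A's leftover = the sieve's leftover
    rw [sieve_snd]
    have hm : PySem.List.sorted (packages.filter (fun p => cA p == "Other")) (fun x => x) false
        = (PySem.List.sorted packages (fun x => x) false).filter
            (fun pkg => matchCatA (PySem.Str.lower pkg) pyPatternsA == none) := by
      rw [sorted_filter, filter_cA_other]
    by_cases h : packages.filter (fun p => cA p == "Other") = []
    · have h2 : (PySem.List.sorted packages (fun x => x) false).filter
          (fun pkg => matchCatA (PySem.Str.lower pkg) pyPatternsA == none) = [] := by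
        rw [← hm, h]
        simp [PySem.List.sorted_eq_nil_iff]
      simp only [List.filterMap_cons, List.filterMap_nil, Function.comp_apply, h, h2, ne_eq,
        not_true_eq_false, ite_false]
    · have h2 : (PySem.List.sorted packages (fun x => x) false).filter
          (fun pkg => matchCatA (PySem.Str.lower pkg) pyPatternsA == none) ≠ [] := by
        rw [← hm]
        simpa [PySem.List.sorted_eq_nil_iff] using h
      simp only [List.filterMap_cons, List.filterMap_nil, Function.comp_apply, ne_eq, h, h2,
        not_false_eq_true, ite_true, hm]
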